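-- pv_equiv track=rewrite | github.com/ErikP0/arithmetic-circuits-for-spn-primitives | MP-SPDZ code/skinny_gf2n.py | cembed8
-- ===== SOURCE A (Python) =====
-- CEMBED_POWERS8 = [1 << 5, 1 << 10, 1 << 15, 1 << 20, 1 << 25, 1 << 30, 1 << 35]
--
-- def cembed8(n):
--     assert isinstance(n, int)
--     b0, b1, b2, b3, b4, b5, b6, b7 = [(n >> i) & 0x1 for i in range(8)]
--     b12 = b1 ^ b2
--     b34 = b3 ^ b4
--
--     y0 = b0 ^ b2 ^ b5 ^ b6 ^ b7
--     y5 = b12 ^ b34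
--     y10 = b1 ^ b6
--     y15 = b3 ^ b6
--     y20 = b1 ^ b3 ^ b5
--     y25 = b12 ^ b34 ^ b6
--     y30 = b1 ^ b4 ^ b7
--     y35 = b12
--     return y0 + sum((b * x for b,x in zip([y5,y10,y15,y20,y25,y30,y35], CEMBED_POWERS8)))
-- ===== SOURCE B (Python) =====
-- # Per-input-bit contribution masks: MASK[i] is the XOR of 2^(5j) over every
-- # output coordinate y_j of the GF(2) embedding that contains input bit b_i.
-- CEMBED_MASKS8 = [
--     1,                                                              # b0 -> y0
--     (1 << 5) | (1 << 10) | (1 << 20) | (1 << 25) | (1 << 30) | (1 << 35),  # b1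
--     1 | (1 << 5) | (1 << 25) | (1 << 35),                           # b2
--     (1 << 5) | (1 << 15) | (1 << 20) | (1 << 25),                   # b3
--     (1 << 5) | (1 << 25) | (1 << 30),                               # b4
--     1 | (1 << 20),                                                  # b5
--     1 | (1 << 10) | (1 << 15) | (1 << 25),                          # b6
--     1 | (1 << 30),                                                  # b7
-- ]
--
-- def cembed8(n):
--     assert isinstance(n, int)
--     result = 0
--     for i in range(8):
--         if (n >> i) & 1:
--             result ^= CEMBED_MASKS8[i]
--     return result
-- ===== Notes on version B (the rewrite author's own statement) =====
-- stated objective: alternative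
-- what changed: Replaces the per-output-coordinate XOR formulas (the y's combined by a sum over zip with the powers list) with a per-input-bit contribution table: one loop over the low input bits XOR-ing a precomputed mask of output positions into an accumulator.
import Mathlib
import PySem

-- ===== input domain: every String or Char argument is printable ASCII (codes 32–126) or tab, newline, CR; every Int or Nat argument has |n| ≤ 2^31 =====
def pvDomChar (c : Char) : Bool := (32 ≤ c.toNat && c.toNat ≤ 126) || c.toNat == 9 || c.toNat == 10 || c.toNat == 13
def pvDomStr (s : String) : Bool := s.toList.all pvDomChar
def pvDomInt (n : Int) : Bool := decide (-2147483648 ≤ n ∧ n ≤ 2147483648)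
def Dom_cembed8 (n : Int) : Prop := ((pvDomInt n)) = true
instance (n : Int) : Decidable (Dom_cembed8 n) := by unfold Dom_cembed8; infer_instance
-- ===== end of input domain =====

-- B replaces the eight per-output-coordinate XOR formulas combined via sum(zip(...))
-- by a single loop over the low input bits, XOR-ing a precomputed contribution mask
-- per set input bit into an accumulator (objective: alternative decomposition).

-- ===== PORT A =====
def CEMBED_POWERS8 : List Int :=
  [(1:Int) <<< 5, (1:Int) <<< 10, (1:Int) <<< 15, (1:Int) <<< 20, (1:Int) <<< 25, (1:Int) <<< 30, (1:Int) <<< 35]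

def cembed8 (n : Int) : Int :=
  let b0 := PySem.Int.band (n >>> (0:Nat)) 1
  let b1 := PySem.Int.band (n >>> (1:Nat)) 1
  let b2 := PySem.Int.band (n >>> (2:Nat)) 1
  let b3 := PySem.Int.band (n >>> (3:Nat)) 1
  let b4 := PySem.Int.band (n >>> (4:Nat)) 1
  let b5 := PySem.Int.band (n >>> (5:Nat)) 1
  let b6 := PySem.Int.band (n >>> (6:Nat)) 1
  let b7 := PySem.Int.band (n >>> (7:Nat)) 1
  let b12 := PySem.Int.bxor b1 b2
  let b34 := PySem.Int.bxor b3 b4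
  let y0 := PySem.Int.bxor (PySem.Int.bxor (PySem.Int.bxor (PySem.Int.bxor b0 b2) b5) b6) b7
  let y5 := PySem.Int.bxor b12 b34
  let y10 := PySem.Int.bxor b1 b6
  let y15 := PySem.Int.bxor b3 b6
  let y20 := PySem.Int.bxor (PySem.Int.bxor b1 b3) b5
  let y25 := PySem.Int.bxor (PySem.Int.bxor b12 b34) b6
  let y30 := PySem.Int.bxor (PySem.Int.bxor b1 b4) b7
  let y35 := b12
  y0 + (List.zip [y5, y10, y15, y20, y25, y30, y35] CEMBED_POWERS8).foldl
    (fun acc p => acc + p.1 * p.2) 0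

-- ===== PORT B =====
def CEMBED_MASKS8 : List Int :=
  [ 1,
    PySem.Int.bor (PySem.Int.bor (PySem.Int.bor (PySem.Int.bor (PySem.Int.bor
      ((1:Int) <<< 5) (1 <<< 10)) (1 <<< 20)) (1 <<< 25)) (1 <<< 30)) (1 <<< 35),
    PySem.Int.bor (PySem.Int.bor (PySem.Int.bor (1 : Int) ((1:Int) <<< 5)) (1 <<< 25)) (1 <<< 35),
    PySem.Int.bor (PySem.Int.bor (PySem.Int.bor ((1:Int) <<< 5) (1 <<< 15)) (1 <<< 20)) (1 <<< 25),
    PySem.Int.bor (PySem.Int.bor ((1:Int) <<< 5) (1 <<< 25)) (1 <<< 30),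
    PySem.Int.bor (1 : Int) ((1 : Int) <<< 20),
    PySem.Int.bor (PySem.Int.bor (PySem.Int.bor (1 : Int) ((1 : Int) <<< 10)) (1 <<< 15)) (1 <<< 25),
    PySem.Int.bor (1 : Int) ((1 : Int) <<< 30) ]

def cembed8_alt (n : Int) : Int :=
  (List.range 8).foldl
    (fun (result : Int) (i : Nat) =>
      if PySem.Int.band (n >>> i) 1 ≠ 0 then
        -- i < 8, so the index is always in range; pyGetD is exact here
        PySem.Int.bxor result (PySem.List.pyGetD CEMBED_MASKS8 (i : Int) 0)
      else result)
    0

-- ===== PRECONDITION & SPEC =====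
def Spec_cembed8 (n : Int) (out : Int) : Prop := out = cembed8_alt n
instance (n : Int) (out : Int) : Decidable (Spec_cembed8 n out) := by unfold Spec_cembed8; infer_instance

-- ===== CLAIM (what is proved, stated in full; the proofs are below) =====
def Claim_equal_cembed8 : Prop := ∀ (n : Int), Dom_cembed8 n → Spec_cembed8 n (cembed8 n)

-- ===== LEMMAS AND PROOFS =====

-- The low bit of any integer is 0 or 1.
theorem pv_band_one_01 (a : Int) : PySem.Int.band a 1 = 0 ∨ PySem.Int.band a 1 = 1 := by
  rw [PySem.Int.band_one]
  have h1 := PySem.Int.mod_nonneg a (b := 2) (by norm_num)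
  have h2 := PySem.Int.mod_lt a (b := 2) (by norm_num)
  omega

-- ===== VERDICT (by name: the statement is the Claim_ definition above) =====
theorem cembed8_spec : Claim_equal_cembed8 := by
  intro n _
  unfold Spec_cembed8 cembed8 cembed8_alt
  have hr : List.range 8 = [0, 1, 2, 3, 4, 5, 6, 7] := by decide
  rw [hr]
  
  rcases pv_band_one_01 (n >>> ((0:Nat))) with h0 | h0 <;>
  rcases pv_band_one_01 (n >>> ((1:Nat))) with h1 | h1 <;>
  rcases pv_band_one_01 (n >>> ((2:Nat))) with h2 | h2 <;>
  rcases pv_band_one_01 (n >>> ((3:Nat))) with h3 | h3 <;>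
  rcases pv_band_one_01 (n >>> ((4:Nat))) with h4 | h4 <;>
  rcases pv_band_one_01 (n >>> ((5:Nat))) with h5 | h5 <;>
  rcases pv_band_one_01 (n >>> ((6:Nat))) with h6 | h6 <;>
  rcases pv_band_one_01 (n >>> ((7:Nat))) with h7 | h7 <;>
  simp only [List.foldl, List.zip, List.zipWith, CEMBED_POWERS8, h0, h1, h2, h3, h4, h5, h6, h7, ne_eq] <;> decide
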